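-- pv_equiv track=rewrite | github.com/Fernando-Utzig/artificial-intelligence-UFRGS | t3-busca-em-grafos/solucao.py | sucessor
-- ===== SOURCE A (Python) =====
-- from typing import Iterable, Set, Tuple
--
-- def sucessor(estado:str)->Set[Tuple[str,str]]:
--     """
--     Recebe um estado (string) e retorna um conjunto de tuplas (ação,estado atingido)
--     para cada ação possível no estado recebido.
--     Tanto a ação quanto o estado atingido são strings também.
--     :param estado:
--     :return:
--     """
--     for i in range(0,9):
--         if estado[i] == "_":
--             pos_espaco = i
--
--     ret = []
--     possiveis_acoes = ["abaixo", "acima", "direita", "esquerda"]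
--
--     if pos_espaco in (0,1,2):
--         ret.append(swap_positions(estado, pos_espaco, pos_espaco+3, possiveis_acoes[0])) # Quando vai para baixo a partir da linha 0
--     elif pos_espaco in (3,4,5):
--         ret.append(swap_positions(estado, pos_espaco, pos_espaco+3, possiveis_acoes[0])) # Quando vai para baixo a partir da linha 1
--         ret.append(swap_positions(estado, pos_espaco, pos_espaco-3, possiveis_acoes[1])) # Quando vai para cima a partir da linha 1
--     else:
--         ret.append(swap_positions(estado, pos_espaco, pos_espaco-3, possiveis_acoes[1])) # Quando vai para cima a partir da linha 2
--
--     if pos_espaco in (0,3,6):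
--         ret.append(swap_positions(estado, pos_espaco, pos_espaco+1, possiveis_acoes[2])) # Quando vai para direita a partir da coluna 0
--     elif pos_espaco in (1,4,7):
--         ret.append(swap_positions(estado, pos_espaco, pos_espaco+1, possiveis_acoes[2])) # Quando vai para direita a partir da coluna 1
--         ret.append(swap_positions(estado, pos_espaco, pos_espaco-1, possiveis_acoes[3])) # Quando vai para esquerda a partir da coluna 1
--     else:
--         ret.append(swap_positions(estado, pos_espaco, pos_espaco-1, possiveis_acoes[3])) # Quando vai para esquerda a partir da coluna 2
--
--     return ret
--
-- def swap_positions(estado, pos_elemento1, pos_elemento2, acao:str):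
--     ret_string = ""
--     for i in range(len(estado)):
--         if i == pos_elemento1:
--             ret_string += estado[pos_elemento2]
--         elif i == pos_elemento2:
--             ret_string += estado[pos_elemento1]
--         else:
--             ret_string += estado[i]
--
--     return (acao, ret_string)
-- ===== SOURCE B (Python) =====
-- def sucessor(estado):
--     pos = estado.rindex('_', 0, 9)
--     row, col = divmod(pos, 3)
--     out = []
--     for acao, j, ok in (("abaixo", pos + 3, row < 2),
--                         ("acima", pos - 3, row > 0),
--                         ("direita", pos + 1, col < 2),
--                         ("esquerda", pos - 1, col > 0)):
--         if ok:
--             s = list(estado)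
--             s[pos], s[j] = s[j], s[pos]
--             out.append((acao, ''.join(s)))
--     return out
-- ===== Notes on version B (the rewrite author's own statement) =====
-- stated objective: simpler
-- what changed: B replaces A's 9-step scan plus two 3-way if/elif chains and the character-by-character string rebuild with rindex over the first 9 chars, divmod(pos,3) row/col guards driving one table of four moves, and a list-element swap.
import Mathlib
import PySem

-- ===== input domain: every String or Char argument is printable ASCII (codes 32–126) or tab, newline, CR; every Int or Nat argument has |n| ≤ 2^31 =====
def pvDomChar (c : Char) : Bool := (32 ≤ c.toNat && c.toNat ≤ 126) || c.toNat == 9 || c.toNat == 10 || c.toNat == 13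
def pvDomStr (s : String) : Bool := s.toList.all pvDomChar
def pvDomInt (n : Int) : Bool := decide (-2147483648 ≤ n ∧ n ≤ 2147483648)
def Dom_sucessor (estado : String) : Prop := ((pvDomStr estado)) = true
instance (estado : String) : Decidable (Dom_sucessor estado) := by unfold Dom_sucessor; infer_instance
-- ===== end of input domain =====

-- B does the same task by a different decomposition: rindex + divmod(pos,3) guards over a
-- four-move table and a list-element swap, instead of A's if/elif chains and per-char rebuild.

-- ===== PORT A =====
-- swap_positions: rebuilds the string character by character over range(len(estado)).
-- Indexing uses List.getD; under Pre_ every index read is in range, so this is exact there.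
def pySwapPositions (cs : List Char) (p1 p2 : Nat) (acao : String) : String × String :=
  (acao, String.ofList ((List.range cs.length).foldl
     (fun acc i => acc ++ [if i = p1 then cs.getD p2 ' '
                           else if i = p2 then cs.getD p1 ' '
                           else cs.getD i ' ']) []))

def sucessor (estado : String) : List (String × String) :=
  let cs := estado.toList
  -- for i in range(0,9): if estado[i] == "_": pos_espaco = i   (last match wins;
  -- none = Python NameError / IndexError, excluded by Pre_)
  let pos? := (List.range 9).foldl
      (fun acc i => if cs.getD i ' ' = '_' then some i else acc) none
  match pos? with
  | none => []
  | some pos =>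
    let ret : List (String × String) := []
    let ret :=
      if pos = 0 ∨ pos = 1 ∨ pos = 2 then
        ret ++ [pySwapPositions cs pos (pos+3) "abaixo"]
      else if pos = 3 ∨ pos = 4 ∨ pos = 5 then
        ret ++ [pySwapPositions cs pos (pos+3) "abaixo"]
            ++ [pySwapPositions cs pos (pos-3) "acima"]
      else
        ret ++ [pySwapPositions cs pos (pos-3) "acima"]
    let ret :=
      if pos = 0 ∨ pos = 3 ∨ pos = 6 then
        ret ++ [pySwapPositions cs pos (pos+1) "direita"]
      else if pos = 1 ∨ pos = 4 ∨ pos = 7 then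
        ret ++ [pySwapPositions cs pos (pos+1) "direita"]
            ++ [pySwapPositions cs pos (pos-1) "esquerda"]
      else
        ret ++ [pySwapPositions cs pos (pos-1) "esquerda"]
    ret

-- ===== PORT B =====
-- exact port of estado.rindex('_', 0, 9) applied to the (≤ 9) chars of the slice:
-- last occurrence; none = Python ValueError, excluded by Pre_.
def pyRindexUnd : List Char → Option Nat
  | [] => none
  | c :: rest =>
    match pyRindexUnd rest with
    | some i => some (i + 1)
    | none => if c = '_' then some 0 else none

-- s = list(estado); s[pos], s[j] = s[j], s[pos]; ''.join(s)
-- (both indices are in range under Pre_, so List.set/getD are exact)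
def altSwap (cs : List Char) (pos j : Nat) (acao : String) : String × String :=
  (acao, String.ofList ((cs.set pos (cs.getD j ' ')).set j (cs.getD pos ' ')))

def sucessor_alt (estado : String) : List (String × String) :=
  let cs := estado.toList
  match pyRindexUnd (cs.take 9) with
  | none => []
  | some pos =>
    -- row, col = divmod(pos, 3): pos is a nonnegative index, so Nat / and % are exact
    let row := pos / 3
    let col := pos % 3
    (([("abaixo", pos + 3, decide (row < 2)),
       ("acima", pos - 3, decide (row > 0)),
       ("direita", pos + 1, decide (col < 2)),
       ("esquerda", pos - 1, decide (col > 0))] : List (String × Nat × Bool)).filter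
       (fun m => m.2.2)).map (fun m => altSwap cs pos m.2.1 m.1)

-- ===== PRECONDITION & SPEC =====
-- Pre_: exactly the inputs on which Python A returns: at least 9 characters
-- (else estado[i] raises IndexError) and a '_' among the first 9 (else NameError).
def Pre_sucessor (estado : String) : Prop :=
  9 ≤ estado.toList.length ∧ '_' ∈ estado.toList.take 9
instance (estado : String) : Decidable (Pre_sucessor estado) := by
  unfold Pre_sucessor; infer_instance

def pvWitness_sucessor : String := "1234_678a"

def Spec_sucessor (estado : String) (out : List (String × String)) : Prop := out = sucessor_alt estado
instance (estado : String) (out : List (String × String)) : Decidable (Spec_sucessor estado out) := by unfold Spec_sucessor; infer_instance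

-- ===== CLAIM (what is proved, stated in full; the proofs are below) =====
def Claim_equal_sucessor : Prop := ∀ (estado : String), Dom_sucessor estado → Pre_sucessor estado → Spec_sucessor estado (sucessor estado)

-- ===== LEMMAS AND PROOFS =====

-- rindex on a snoc: the appended char wins if it is '_'
theorem pyRindexUnd_append (l : List Char) (c : Char) :
    pyRindexUnd (l ++ [c]) = if c = '_' then some l.length else pyRindexUnd l := by
  induction l with
  | nil => simp [pyRindexUnd]
  | cons d rest ih =>
    simp only [List.cons_append, pyRindexUnd, ih]
    by_cases hc : c = '_' <;> simp only [hc, if_true, if_false] <;>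
      cases pyRindexUnd rest <;> simp

-- A's forward last-match scan equals B's rindex on the taken prefix
theorem fold_eq_rindex (cs : List Char) :
    ∀ n, n ≤ cs.length →
    (List.range n).foldl (fun acc i => if cs.getD i ' ' = '_' then some i else acc) none
      = pyRindexUnd (cs.take n) := by
  intro n
  induction n with
  | zero => intro _; simp [pyRindexUnd]
  | succ m ih =>
    intro h
    have hm : m < cs.length := by omega
    rw [List.range_succ, List.foldl_append, ih (by omega)]
    have htake : cs.take (m + 1) = cs.take m ++ [cs[m]] := by
      rw [List.take_add_one]; simp [List.getElem?_eq_getElem hm]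
    rw [htake, pyRindexUnd_append]
    simp [List.getD_eq_getElem?_getD, List.getElem?_eq_getElem hm, List.length_take,
      Nat.min_eq_left (Nat.le_of_lt hm)]

theorem pyRindexUnd_isSome {l : List Char} (h : '_' ∈ l) : (pyRindexUnd l).isSome := by
  induction l with
  | nil => simp at h
  | cons c rest ih =>
    simp only [pyRindexUnd]
    cases hr : pyRindexUnd rest with
    | some i => simp
    | none =>
      rcases List.mem_cons.mp h with h1 | h2
      · simp [h1.symm]
      · have := ih h2; rw [hr] at this; simp at this

theorem pyRindexUnd_lt {l : List Char} {i : Nat} (h : pyRindexUnd l = some i) :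
    i < l.length := by
  induction l generalizing i with
  | nil => simp [pyRindexUnd] at h
  | cons c rest ih =>
    simp only [pyRindexUnd] at h
    cases hr : pyRindexUnd rest with
    | some j =>
      rw [hr] at h; simp at h
      have := ih hr; simp; omega
    | none =>
      rw [hr] at h
      by_cases hc : c = '_' <;> simp [hc] at h <;> simp <;> omega

-- A's char-by-char rebuild of the swap equals B's two-set swap
theorem swap_eq (cs : List Char) (p1 p2 : Nat) (a : String)
    (h1 : p1 < cs.length) (h2 : p2 < cs.length) :
    pySwapPositions cs p1 p2 a = altSwap cs p1 p2 a := by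
  unfold pySwapPositions altSwap
  simp only [Prod.mk.injEq, true_and]
  congr 1
  rw [PySem.List.foldl_append_singleton_eq_map]
  simp only [List.nil_append]
  apply List.ext_getElem
  · simp
  · intro i hi _
    have hi' : i < cs.length := by simpa using hi
    simp only [List.getElem_map, List.getElem_range, List.getElem_set,
      List.getD_eq_getElem?_getD, List.getElem?_eq_getElem h1, List.getElem?_eq_getElem h2,
      List.getElem?_eq_getElem hi', Option.getD_some]
    split_ifs <;> first
    | rfl
    | (subst_vars; rfl)
    | (exfalso; simp_all)

-- ===== VERDICT (by name: the statement is the Claim_ definition above) =====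
theorem sucessor_spec : Claim_equal_sucessor := by
  intro estado _ hpre
  obtain ⟨hlen, hmem⟩ := hpre
  unfold Spec_sucessor sucessor sucessor_alt
  simp only []
  rw [fold_eq_rindex estado.toList 9 hlen]
  cases hr : pyRindexUnd (estado.toList.take 9) with
  | none =>
    have h := pyRindexUnd_isSome hmem
    simp [hr] at h
  | some pos =>
    have hlt : pos < 9 := by
      have := pyRindexUnd_lt hr
      simp [List.length_take] at this
      omega
    interval_cases pos <;> simp only [List.filter] <;> norm_num <;>
      and_intros <;> exact swap_eq _ _ _ _ (by omega) (by omega)
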